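-- pv_equiv track=rewrite | github.com/JOSCHLINER/adventofcode | DayOne/main.py | isspelled
-- ===== SOURCE A (Python) =====
-- LETTERS = {'one': 1, 'two': 2, 'three': 3, 'four': 4, 'five': 5, 'six': 6, 'seven': 7, 'eight': 8, 'nine': 9}
--
-- def isspelled(word: str, rev: bool) -> int:
--     length = len(word)
--     if length < 3:
--         return 0
--
--     if rev:
--         for i in range(3, min(6, length + 1)):
--             if word[-i:] in LETTERS:
--                 return LETTERS[word[-i:]]
--     else:
--         for i in range(3, min(6, length + 1)):
--
--             if word[:i] in LETTERS:
--                 return LETTERS[word[:i]]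
--
--     return 0
-- ===== SOURCE B (Python) =====
-- LETTERS = {'one': 1, 'two': 2, 'three': 3, 'four': 4, 'five': 5, 'six': 6, 'seven': 7, 'eight': 8, 'nine': 9}
--
-- def isspelled(word: str, rev: bool) -> int:
--     for spelled, value in LETTERS.items():
--         if word.endswith(spelled) if rev else word.startswith(spelled):
--             return value
--     return 0
-- ===== Notes on version B (the rewrite author's own statement) =====
-- stated objective: idiomatic
-- what changed: Instead of looping over substring lengths 3..5 and testing word slices for dict membership (with a length<3 guard), B iterates over the LETTERS items and returns the value of the first spelled digit that is a prefix (or suffix, if rev) of the word via startswith/endswith, returning 0 if none matches.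
import Mathlib
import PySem

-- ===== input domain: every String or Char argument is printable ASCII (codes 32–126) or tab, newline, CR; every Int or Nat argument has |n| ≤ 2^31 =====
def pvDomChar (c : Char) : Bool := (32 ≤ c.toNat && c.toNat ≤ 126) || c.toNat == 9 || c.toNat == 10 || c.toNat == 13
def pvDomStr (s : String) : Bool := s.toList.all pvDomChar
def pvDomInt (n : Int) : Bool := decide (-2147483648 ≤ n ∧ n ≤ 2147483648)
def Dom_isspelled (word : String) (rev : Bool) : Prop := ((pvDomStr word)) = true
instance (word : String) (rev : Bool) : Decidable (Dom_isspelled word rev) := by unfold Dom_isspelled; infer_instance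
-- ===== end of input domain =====

-- B replaces A's loop over substring lengths 3..5 with dict membership by a loop over the
-- LETTERS items using startswith/endswith; same return value on every input (idiomatic rewrite).

-- ===== PORT A =====
def LETTERS : PySem.Dict String Int :=
  PySem.Dict.ofList [("one",1),("two",2),("three",3),("four",4),("five",5),("six",6),("seven",7),("eight",8),("nine",9)]

-- the 'for i in range(...)' loop of the rev branch, with early return
def isspelledLoopRev (word : String) : List Int → Int
  | [] => 0
  | i :: rest =>
    if LETTERS.contains (PySem.Str.slice word (some (-i)) none) then
      (LETTERS.get? (PySem.Str.slice word (some (-i)) none)).getD 0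
    else isspelledLoopRev word rest

-- the 'for i in range(...)' loop of the non-rev branch, with early return
def isspelledLoopFwd (word : String) : List Int → Int
  | [] => 0
  | i :: rest =>
    if LETTERS.contains (PySem.Str.slice word none (some i)) then
      (LETTERS.get? (PySem.Str.slice word none (some i))).getD 0
    else isspelledLoopFwd word rest

def isspelled (word : String) (rev : Bool) : Int :=
  let length : Int := PySem.Str.len word
  if length < 3 then 0
  else if rev then isspelledLoopRev word (PySem.List.pyRange 3 (min 6 (length + 1)) 1)
  else isspelledLoopFwd word (PySem.List.pyRange 3 (min 6 (length + 1)) 1)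

-- ===== PORT B =====
-- 'for spelled, value in LETTERS.items(): if word.endswith/startswith(spelled): return value'
def isspelledAltGo (word : String) (rev : Bool) : List (String × Int) → Int
  | [] => 0
  | (spelled, value) :: rest =>
    if (if rev then PySem.Str.endswith word spelled else PySem.Str.startswith word spelled) then value
    else isspelledAltGo word rev rest

def isspelled_alt (word : String) (rev : Bool) : Int :=
  isspelledAltGo word rev LETTERS.items

-- ===== PRECONDITION & SPEC =====
def Spec_isspelled (word : String) (rev : Bool) (out : Int) : Prop := out = isspelled_alt word rev
instance (word : String) (rev : Bool) (out : Int) : Decidable (Spec_isspelled word rev out) := by unfold Spec_isspelled; infer_instance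

-- ===== CLAIM (what is proved, stated in full; the proofs are below) =====
def Claim_equal_isspelled : Prop := ∀ (word : String) (rev : Bool), Dom_isspelled word rev → Spec_isspelled word rev (isspelled word rev)

-- ===== LEMMAS AND PROOFS =====

lemma LETTERS_items : LETTERS.items =
    [("one",1),("two",2),("three",3),("four",4),("five",5),("six",6),("seven",7),("eight",8),("nine",9)] := by rfl

lemma tl_one : ("one" : String).toList = ['o','n','e'] := by decide
lemma tl_two : ("two" : String).toList = ['t','w','o'] := by decide
lemma tl_three : ("three" : String).toList = ['t','h','r','e','e'] := by decide
lemma tl_four : ("four" : String).toList = ['f','o','u','r'] := by decide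
lemma tl_five : ("five" : String).toList = ['f','i','v','e'] := by decide
lemma tl_six : ("six" : String).toList = ['s','i','x'] := by decide
lemma tl_seven : ("seven" : String).toList = ['s','e','v','e','n'] := by decide
lemma tl_eight : ("eight" : String).toList = ['e','i','g','h','t'] := by decide
lemma tl_nine : ("nine" : String).toList = ['n','i','n','e'] := by decide

lemma beq_toList (k s : String) : (k == s) = decide (k.toList = s.toList) := by
  rw [Bool.eq_iff_iff]; simp [String.toList_inj]

-- one body-step of A's loop, evaluated over the literal dict
lemma step_eval (s : String) (z : Int) :
    (if LETTERS.contains s then (LETTERS.get? s).getD 0 else z) =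
    (if s.toList = ['o','n','e'] then 1 else
     if s.toList = ['t','w','o'] then 2 else
     if s.toList = ['t','h','r','e','e'] then 3 else
     if s.toList = ['f','o','u','r'] then 4 else
     if s.toList = ['f','i','v','e'] then 5 else
     if s.toList = ['s','i','x'] then 6 else
     if s.toList = ['s','e','v','e','n'] then 7 else
     if s.toList = ['e','i','g','h','t'] then 8 else
     if s.toList = ['n','i','n','e'] then 9 else z) := by
  simp only [PySem.Dict.contains, PySem.Dict.get?, LETTERS_items, List.any_cons, List.any_nil,
    List.find?, beq_toList, tl_one, tl_two, tl_three, tl_four, tl_five, tl_six, tl_seven, tl_eight, tl_nine]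
  by_cases h1 : s.toList = ['o','n','e'] <;> simp [h1]
  by_cases h2 : s.toList = ['t','w','o'] <;> simp [h2]
  by_cases h3 : s.toList = ['t','h','r','e','e'] <;> simp [h3]
  by_cases h4 : s.toList = ['f','o','u','r'] <;> simp [h4]
  by_cases h5 : s.toList = ['f','i','v','e'] <;> simp [h5]
  by_cases h6 : s.toList = ['s','i','x'] <;> simp [h6]
  by_cases h7 : s.toList = ['s','e','v','e','n'] <;> simp [h7]
  by_cases h8 : s.toList = ['e','i','g','h','t'] <;> simp [h8]
  by_cases h9 : s.toList = ['n','i','n','e'] <;> simp [h9]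
  intro hor
  rcases hor with h|h|h|h|h|h|h|h|h
  exacts [absurd h.symm h1, absurd h.symm h2, absurd h.symm h3, absurd h.symm h4,
    absurd h.symm h5, absurd h.symm h6, absurd h.symm h7, absurd h.symm h8, absurd h.symm h9]

-- word.startswith(k) is a prefix test, phrased as a take-equality
lemma sw_eq_take (w k : String) :
    PySem.Str.startswith w k = decide (w.toList.take k.toList.length = k.toList) := by
  simp only [PySem.Str.startswith]
  rw [Bool.eq_iff_iff]
  simp only [PySem.Chars.startswith_iff, List.prefix_iff_eq_take, decide_eq_true_eq]
  exact eq_comm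

-- word.endswith(k) is a suffix test, phrased as a drop-equality
lemma ew_eq_drop (w k : String) :
    PySem.Str.endswith w k = decide (w.toList.drop (w.toList.length - k.toList.length) = k.toList) := by
  simp only [PySem.Str.endswith]
  rw [Bool.eq_iff_iff]
  simp only [PySem.Chars.endswith_iff, List.suffix_iff_eq_drop, decide_eq_true_eq]
  exact eq_comm

lemma sub53 (m : Nat) : m + 5 - 3 = m + 2 := by omega
lemma sub54 (m : Nat) : m + 5 - 4 = m + 1 := by omega
lemma sub55 (m : Nat) : m + 5 - 5 = m := by omega

set_option maxHeartbeats 1000000 in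
lemma fwd_big (word : String) (a b c d e : Char) (t : List Char)
    (hw : word.toList = a::b::c::d::e::t) :
    isspelledLoopFwd word [3,4,5] = isspelledAltGo word false LETTERS.items := by
  simp only [isspelledLoopFwd, isspelledAltGo, LETTERS_items, step_eval, sw_eq_take,
    Bool.if_false_left, Bool.if_true_left, if_false, tl_one, tl_two, tl_three, tl_four, tl_five, tl_six, tl_seven, tl_eight, tl_nine, PySem.Str.toList_slice,
    PySem.Chars.slice_eq_listSlice, List.length_cons, List.length_nil]
  rw [PySem.List.slice_to _ (by norm_num), PySem.List.slice_to _ (by norm_num),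
      PySem.List.slice_to _ (by norm_num)]
  simp only [hw, Int.reduceToNat, List.take_succ_cons, List.take_zero, decide_eq_true_eq,
    List.cons.injEq, Nat.reduceAdd, Nat.reduceSub]
  by_cases g1 : a = 'o' <;> simp [g1]
  by_cases g2 : a = 't' <;> simp [g2]
  by_cases g3 : a = 'f' <;> simp [g3]
  by_cases g4 : a = 's' <;> simp [g4]
  by_cases g5 : a = 'n' <;> simp [g5]

set_option maxHeartbeats 1000000 in
lemma rev_big (word : String) (a b c d e : Char) (u : List Char)
    (hw : word.toList = u ++ [e,d,c,b,a]) :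
    isspelledLoopRev word [3,4,5] = isspelledAltGo word true LETTERS.items := by
  simp only [isspelledLoopRev, isspelledAltGo, LETTERS_items, step_eval, ew_eq_drop,
    Bool.if_false_left, Bool.if_true_left, if_false, tl_one, tl_two, tl_three, tl_four, tl_five, tl_six, tl_seven, tl_eight, tl_nine, PySem.Str.toList_slice,
    PySem.Chars.slice_eq_listSlice, List.length_cons, List.length_nil]
  rw [PySem.List.slice_from_neg_ofNat _ 3 (by norm_num),
      PySem.List.slice_from_neg_ofNat _ 4 (by norm_num),
      PySem.List.slice_from_neg_ofNat _ 5 (by norm_num)]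
  simp only [hw, List.length_append, List.length_cons, List.length_nil, Nat.reduceAdd,
    sub53, sub54, sub55, List.drop_length_add_append, List.drop_left,
    List.drop_succ_cons, List.drop_zero, decide_eq_true_eq, List.cons.injEq]
  by_cases g1 : a = 'e' <;> simp [g1]
  · by_cases g2 : b = 'n' <;> simp [g2]
    by_cases g3 : b = 'v' <;> simp [g3]
  · by_cases g2 : a = 'o' <;> simp [g2]
    by_cases g3 : a = 'x' <;> simp [g3]


lemma range_3 : PySem.List.pyRange 3 (min 6 ((((3:Nat)):Int)+1)) 1 = [3] := by decide
lemma range_4 : PySem.List.pyRange 3 (min 6 ((((4:Nat)):Int)+1)) 1 = [3,4] := by decide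
lemma range_big (n : Nat) (h : 5 ≤ n) : PySem.List.pyRange 3 (min 6 ((n:Int)+1)) 1 = [3,4,5] := by
  have hm : min (6:Int) ((n:Int)+1) = 6 := by omega
  rw [hm]; decide

set_option maxHeartbeats 1000000 in
lemma fwd_3 (word : String) (a b c : Char) (hw : word.toList = [a,b,c]) :
    isspelledLoopFwd word [3] = isspelledAltGo word false LETTERS.items := by
  simp only [isspelledLoopFwd, isspelledAltGo, LETTERS_items, step_eval, sw_eq_take,
    Bool.if_false_left, Bool.if_true_left, if_false, tl_one, tl_two, tl_three, tl_four, tl_five, tl_six, tl_seven, tl_eight, tl_nine, PySem.Str.toList_slice,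
    PySem.Chars.slice_eq_listSlice, List.length_cons, List.length_nil]
  rw [PySem.List.slice_to _ (by norm_num)]
  simp [hw, List.take]

set_option maxHeartbeats 1000000 in
lemma fwd_4 (word : String) (a b c d : Char) (hw : word.toList = [a,b,c,d]) :
    isspelledLoopFwd word [3,4] = isspelledAltGo word false LETTERS.items := by
  simp only [isspelledLoopFwd, isspelledAltGo, LETTERS_items, step_eval, sw_eq_take,
    Bool.if_false_left, Bool.if_true_left, if_false, tl_one, tl_two, tl_three, tl_four, tl_five, tl_six, tl_seven, tl_eight, tl_nine, PySem.Str.toList_slice,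
    PySem.Chars.slice_eq_listSlice, List.length_cons, List.length_nil]
  rw [PySem.List.slice_to _ (by norm_num), PySem.List.slice_to _ (by norm_num)]
  simp only [hw, Int.reduceToNat, List.take_succ_cons, List.take_zero, List.take_nil,
    decide_eq_true_eq, List.cons.injEq, Nat.reduceAdd, Nat.reduceSub]
  try (by_cases g1 : a = 's' <;> simp [g1])

set_option maxHeartbeats 1000000 in
lemma rev_3 (word : String) (a b c : Char) (hw : word.toList = [a,b,c]) :
    isspelledLoopRev word [3] = isspelledAltGo word true LETTERS.items := by
  simp only [isspelledLoopRev, isspelledAltGo, LETTERS_items, step_eval, ew_eq_drop,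
    Bool.if_false_left, Bool.if_true_left, if_false, tl_one, tl_two, tl_three, tl_four, tl_five, tl_six, tl_seven, tl_eight, tl_nine, PySem.Str.toList_slice,
    PySem.Chars.slice_eq_listSlice, List.length_cons, List.length_nil]
  rw [PySem.List.slice_from_neg_ofNat _ 3 (by norm_num)]
  simp [hw, List.drop]

set_option maxHeartbeats 1000000 in
lemma rev_4 (word : String) (a b c d : Char) (hw : word.toList = [a,b,c,d]) :
    isspelledLoopRev word [3,4] = isspelledAltGo word true LETTERS.items := by
  simp only [isspelledLoopRev, isspelledAltGo, LETTERS_items, step_eval, ew_eq_drop,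
    Bool.if_false_left, Bool.if_true_left, if_false, tl_one, tl_two, tl_three, tl_four, tl_five, tl_six, tl_seven, tl_eight, tl_nine, PySem.Str.toList_slice,
    PySem.Chars.slice_eq_listSlice, List.length_cons, List.length_nil]
  rw [PySem.List.slice_from_neg_ofNat _ 3 (by norm_num),
      PySem.List.slice_from_neg_ofNat _ 4 (by norm_num)]
  simp only [hw, List.length_cons, List.length_nil, Nat.reduceAdd, Nat.reduceSub,
    List.drop_succ_cons, List.drop_zero, decide_eq_true_eq, List.cons.injEq]
  try (by_cases g1 : b = 's' <;> simp [g1])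

theorem isspelled_eq (word : String) (rev : Bool) : isspelled word rev = isspelled_alt word rev := by
  cases rev with
  | false =>
    rcases hw : word.toList with _|⟨a,_|⟨b,_|⟨c,_|⟨d,_|⟨e,t⟩⟩⟩⟩⟩
    · simp [isspelled, isspelled_alt, isspelledAltGo, LETTERS_items, PySem.Str.len_eq, hw,
        PySem.Chars.startswith_iff, List.cons_prefix_cons, List.prefix_nil, tl_one, tl_two,
        tl_three, tl_four, tl_five, tl_six, tl_seven, tl_eight, tl_nine]
    · simp [isspelled, isspelled_alt, isspelledAltGo, LETTERS_items, PySem.Str.len_eq, hw,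
        PySem.Chars.startswith_iff, List.cons_prefix_cons, List.prefix_nil, tl_one, tl_two,
        tl_three, tl_four, tl_five, tl_six, tl_seven, tl_eight, tl_nine]
    · simp [isspelled, isspelled_alt, isspelledAltGo, LETTERS_items, PySem.Str.len_eq, hw,
        PySem.Chars.startswith_iff, List.cons_prefix_cons, List.prefix_nil, tl_one, tl_two,
        tl_three, tl_four, tl_five, tl_six, tl_seven, tl_eight, tl_nine]
    · have hn : word.toList.length = 3 := by rw [hw]; rfl
      simp only [isspelled, isspelled_alt, PySem.Str.len_eq, hn, Bool.false_eq_true, if_false]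
      rw [if_neg (by norm_num), range_3]
      exact fwd_3 word a b c hw
    · have hn : word.toList.length = 4 := by rw [hw]; rfl
      simp only [isspelled, isspelled_alt, PySem.Str.len_eq, hn, Bool.false_eq_true, if_false]
      rw [if_neg (by norm_num), range_4]
      exact fwd_4 word a b c d hw
    · have h5 : 5 ≤ word.toList.length := by rw [hw]; simp only [List.length_cons]; omega
      simp only [isspelled, isspelled_alt, PySem.Str.len_eq, Bool.false_eq_true, if_false]
      rw [if_neg (by exact_mod_cast by omega), range_big _ h5]
      exact fwd_big word a b c d e t hw
  | true =>
    rcases hR : word.toList.reverse with _|⟨a,_|⟨b,_|⟨c,_|⟨d,_|⟨e,t⟩⟩⟩⟩⟩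
    · have hw : word.toList = [] := by simpa using congrArg List.reverse hR
      simp [isspelled, isspelled_alt, isspelledAltGo, LETTERS_items, PySem.Str.len_eq, hw,
        PySem.Chars.endswith_iff, List.suffix_cons_iff, List.suffix_nil, tl_one, tl_two,
        tl_three, tl_four, tl_five, tl_six, tl_seven, tl_eight, tl_nine]
    · have hw : word.toList = [a] := by simpa using congrArg List.reverse hR
      simp [isspelled, isspelled_alt, isspelledAltGo, LETTERS_items, PySem.Str.len_eq, hw,
        PySem.Chars.endswith_iff, List.suffix_cons_iff, List.suffix_nil, tl_one, tl_two,
        tl_three, tl_four, tl_five, tl_six, tl_seven, tl_eight, tl_nine]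
    · have hw : word.toList = [b,a] := by simpa using congrArg List.reverse hR
      simp [isspelled, isspelled_alt, isspelledAltGo, LETTERS_items, PySem.Str.len_eq, hw,
        PySem.Chars.endswith_iff, List.suffix_cons_iff, List.suffix_nil, tl_one, tl_two,
        tl_three, tl_four, tl_five, tl_six, tl_seven, tl_eight, tl_nine]
    · have hw : word.toList = [c,b,a] := by simpa using congrArg List.reverse hR
      have hn : word.toList.length = 3 := by rw [hw]; rfl
      simp only [isspelled, isspelled_alt, PySem.Str.len_eq, hn, if_true]
      rw [if_neg (by norm_num), range_3]
      exact rev_3 word c b a hw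
    · have hw : word.toList = [d,c,b,a] := by simpa using congrArg List.reverse hR
      have hn : word.toList.length = 4 := by rw [hw]; rfl
      simp only [isspelled, isspelled_alt, PySem.Str.len_eq, hn, if_true]
      rw [if_neg (by norm_num), range_4]
      exact rev_4 word d c b a hw
    · have hw : word.toList = t.reverse ++ [e,d,c,b,a] := by simpa using congrArg List.reverse hR
      have h5 : 5 ≤ word.toList.length := by rw [hw]; simp only [List.length_append, List.length_cons, List.length_nil]; omega
      simp only [isspelled, isspelled_alt, PySem.Str.len_eq, if_true]
      rw [if_neg (by exact_mod_cast by omega), range_big _ h5]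
      exact rev_big word a b c d e t.reverse hw

-- ===== VERDICT (by name: the statement is the Claim_ definition above) =====
theorem isspelled_spec : Claim_equal_isspelled := by
  intro word rev _
  exact isspelled_eq word rev
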